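-- pv_equiv track=rewrite | github.com/shenlab-sinai/region_analysis | regionanalysis/__init__.py | getBestHit
-- ===== SOURCE A (Python) =====
-- def getDis2TSS(anno_db, cur_input, col_no_input):
--     """
--     Calculate the distance to TSS and decide the annotation feature of the entry.
--     """
--     # calculate TSS and TES based on strands.
--     # if strand is not "-" then it will be treated as "+".
--     if cur_input[col_no_input + 5] != "-":
--         TSS = int(cur_input[col_no_input + 10])
--         TES = int(cur_input[col_no_input + 11])
--         cur_input[col_no_input + 1] = str(int(TSS))
--         cur_input[col_no_input + 2] = str(int(TES))
--         Dis2TSS = int(cur_input[1]) - TSS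
--         Dis2TES = int(cur_input[1]) - TES
--     else:
--         TSS = int(cur_input[col_no_input + 11])
--         TES = int(cur_input[col_no_input + 10])
--         cur_input[col_no_input + 1] = str(int(TES))
--         cur_input[col_no_input + 2] = str(int(TSS))
--         Dis2TSS = TSS - int(cur_input[1])
--         Dis2TES = TES - int(cur_input[1])
--     if abs(Dis2TSS) <= 250:
--         Pos = "ProximalPromoter"
--     elif abs(Dis2TSS) <= 1000:
--         Pos = "Promoter1k"
--     elif abs(Dis2TSS) <= 3000:
--         Pos = "Promoter3k"
--     else:
--         Pos = "genebody"
--     if anno_db == "ensembl":  # output is gid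
--         cur_output = [
--             cur_input[col_no_input+3], cur_input[col_no_input+5], cur_input[col_no_input+6],
--             cur_input[col_no_input+10], cur_input[col_no_input+11], Pos, str(Dis2TSS),
--             cur_input[col_no_input+9]]
--     else:  # output is gene symbol
--         cur_output = [cur_input[col_no_input+4], cur_input[col_no_input+5], cur_input[col_no_input+6],
--             cur_input[col_no_input+10], cur_input[col_no_input+11], Pos, str(Dis2TSS),
--             cur_input[col_no_input+9]]
--     return (cur_output, Dis2TSS, Dis2TES)
--
-- def getBestHit(anno_db, col_no_input, GB_entry, gd_entry, st_entry, pc_entry):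
--     """
--     format all hits and get the best hit that is neartest to TSS.
--     """
--     best_hit, cur_output, Dis2TSS, Dis2TES = (None, None, None, None)
--     formatted = []
--
--     for i in GB_entry:
--         # discard null hit of genebody entry.
--         if not ((i[col_no_input] == ".") and (i[col_no_input + 1] == "-1")):
--             cur_output, Dis2TSS, Dis2TES = getDis2TSS(
--                 anno_db, i, col_no_input)
--             if (best_hit is None) or (abs(int(best_hit[6])) > abs(Dis2TSS)):
--                 best_hit = cur_output
--             formatted.append(cur_output)
--     if gd_entry != "0":
--         cur_output = ["NA", "NA", ".", "NA", "NA", "Genedesert", "NA", "No_anno"]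
--         if (best_hit is None):
--             best_hit = cur_output
--         formatted.append(cur_output)
--     if st_entry != "0":
--         cur_output = ["NA", "NA", ".", "NA", "NA", "Subtelomere", "NA", "No_anno"]
--         if (best_hit is None):
--             best_hit = cur_output
--         formatted.append(cur_output)
--     if pc_entry != "0":
--         cur_output = ["NA", "NA", ".", "NA", "NA",
--                       "Pericentromere", "NA", "No_anno"]
--         if (best_hit is None):
--             best_hit = cur_output
--         formatted.append(cur_output)
--     if best_hit is None:
--         cur_output = ["NA", "NA", ".", "NA", "NA",
--                       "Otherintergenic", "NA", "No_anno"]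
--         best_hit = cur_output
--         formatted.append(cur_output)
--     return (formatted, best_hit)
-- ===== SOURCE B (Python) =====
-- def getDis2TSS(anno_db, cur_input, col_no_input):
--     """
--     Calculate the distance to TSS and decide the annotation feature of the entry.
--     (unchanged helper: its in-place mutation of cur_input is an observable side effect)
--     """
--     if cur_input[col_no_input + 5] != "-":
--         TSS = int(cur_input[col_no_input + 10])
--         TES = int(cur_input[col_no_input + 11])
--         cur_input[col_no_input + 1] = str(int(TSS))
--         cur_input[col_no_input + 2] = str(int(TES))
--         Dis2TSS = int(cur_input[1]) - TSS
--         Dis2TES = int(cur_input[1]) - TES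
--     else:
--         TSS = int(cur_input[col_no_input + 11])
--         TES = int(cur_input[col_no_input + 10])
--         cur_input[col_no_input + 1] = str(int(TES))
--         cur_input[col_no_input + 2] = str(int(TSS))
--         Dis2TSS = TSS - int(cur_input[1])
--         Dis2TES = TES - int(cur_input[1])
--     if abs(Dis2TSS) <= 250:
--         Pos = "ProximalPromoter"
--     elif abs(Dis2TSS) <= 1000:
--         Pos = "Promoter1k"
--     elif abs(Dis2TSS) <= 3000:
--         Pos = "Promoter3k"
--     else:
--         Pos = "genebody"
--     if anno_db == "ensembl":
--         cur_output = [
--             cur_input[col_no_input+3], cur_input[col_no_input+5], cur_input[col_no_input+6],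
--             cur_input[col_no_input+10], cur_input[col_no_input+11], Pos, str(Dis2TSS),
--             cur_input[col_no_input+9]]
--     else:
--         cur_output = [cur_input[col_no_input+4], cur_input[col_no_input+5], cur_input[col_no_input+6],
--             cur_input[col_no_input+10], cur_input[col_no_input+11], Pos, str(Dis2TSS),
--             cur_input[col_no_input+9]]
--     return (cur_output, Dis2TSS, Dis2TES)
--
--
-- def _keyed(anno_db, col_no_input, row):
--     # a genebody hit as (output, rank 0, |Dis2TSS|)
--     out, dis, _ = getDis2TSS(anno_db, row, col_no_input)
--     return (out, 0, abs(dis))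
--
--
-- def getBestHit(anno_db, col_no_input, GB_entry, gd_entry, st_entry, pc_entry):
--     """
--     Uniform-pool version: every candidate (genebody hit or NA entry) is put in ONE
--     keyed pool with a lexicographic priority key (rank, |Dis2TSS|) -- genebody hits
--     rank 0, NA entries rank 1 -- and the best hit is simply min() over the pool
--     (Python's min returns the FIRST minimal element, which is exactly A's strict-'>'
--     tie-breaking and its NA ordering); only the empty pool needs the fallback.
--     """
--     gb = [_keyed(anno_db, col_no_input, row) for row in GB_entry
--           if row[col_no_input] != "." or row[col_no_input + 1] != "-1"]
--     na = [(["NA", "NA", ".", "NA", "NA", pos, "NA", "No_anno"], 1, 0)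
--           for flag, pos in ((gd_entry, "Genedesert"),
--                             (st_entry, "Subtelomere"),
--                             (pc_entry, "Pericentromere"))
--           if flag != "0"]
--     entries = gb + na
--     if not entries:
--         fallback = ["NA", "NA", ".", "NA", "NA", "Otherintergenic", "NA", "No_anno"]
--         return ([fallback], fallback)
--     best = min(entries, key=lambda e: (e[1], e[2]))
--     return ([e[0] for e in entries], best[0])
-- ===== Notes on version B (the rewrite author's own statement) =====
-- stated objective: alternative
-- what changed: Replaces A's interleaved None-sentinel scan with three copy-pasted NA blocks by a uniform keyed candidate pool: every genebody hit gets priority key (0, |Dis2TSS|) and every Genedesert/Subtelomere/Pericentromere NA entry key (1, 0), and the best hit is a single library min() over the pool under the lexicographic key (first-minimal = A's strict-'>' tie-breaking and NA ordering); only the empty pool needs the Otherintergenic fallback.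
import Mathlib
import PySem

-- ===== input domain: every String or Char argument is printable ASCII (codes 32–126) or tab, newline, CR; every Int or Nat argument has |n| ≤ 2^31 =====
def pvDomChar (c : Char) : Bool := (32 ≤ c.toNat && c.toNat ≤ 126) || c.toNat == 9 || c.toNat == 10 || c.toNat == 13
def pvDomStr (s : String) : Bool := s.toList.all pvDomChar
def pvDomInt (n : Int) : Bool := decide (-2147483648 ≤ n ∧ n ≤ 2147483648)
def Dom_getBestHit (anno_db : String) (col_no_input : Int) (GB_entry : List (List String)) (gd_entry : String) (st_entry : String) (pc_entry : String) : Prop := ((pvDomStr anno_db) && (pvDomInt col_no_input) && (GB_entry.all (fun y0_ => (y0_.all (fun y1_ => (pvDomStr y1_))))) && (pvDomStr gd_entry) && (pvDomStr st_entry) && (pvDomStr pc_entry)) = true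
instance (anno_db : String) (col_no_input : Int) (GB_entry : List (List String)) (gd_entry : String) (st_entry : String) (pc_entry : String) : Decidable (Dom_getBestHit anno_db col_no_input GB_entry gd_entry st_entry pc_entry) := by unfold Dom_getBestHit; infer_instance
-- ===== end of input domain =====

-- B replaces A's interleaved None-sentinel scan (with three copy-pasted NA blocks) by a uniform
-- keyed candidate pool — genebody hits keyed (0, |Dis2TSS|), NA entries keyed (1, 0) — whose best
-- hit is one library min under the lexicographic key; equivalence is about the RETURN value only
-- (both call the unchanged getDis2TSS, so both mutate the rows identically).


-- ===== PORT A =====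
-- total forms of xs[i] / int(s); Pre_getBestHit guarantees the index is in range / the parse succeeds
def pvGet (xs : List String) (i : Int) : String := PySem.List.pyGetD xs i ""
def pvInt (s : String) : Int := (PySem.Int.ofStr? s).getD 0

-- shared module helper (B's Python keeps it unchanged); returns (cur_output, Dis2TSS, Dis2TES);
-- the Python mutation of cur_input is local here: the mutated row is read but never returned
def getDis2TSS (anno_db : String) (cur_input : List String) (col_no_input : Int) :
    List String × Int × Int :=
  let r :=
    if pvGet cur_input (col_no_input + 5) ≠ "-" then
      let TSS := pvInt (pvGet cur_input (col_no_input + 10))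
      let TES := pvInt (pvGet cur_input (col_no_input + 11))
      let c1 := PySem.List.pySetD cur_input (col_no_input + 1) (PySem.Int.toStr TSS)
      let c2 := PySem.List.pySetD c1 (col_no_input + 2) (PySem.Int.toStr TES)
      (c2, pvInt (pvGet c2 1) - TSS, pvInt (pvGet c2 1) - TES)
    else
      let TSS := pvInt (pvGet cur_input (col_no_input + 11))
      let TES := pvInt (pvGet cur_input (col_no_input + 10))
      let c1 := PySem.List.pySetD cur_input (col_no_input + 1) (PySem.Int.toStr TES)
      let c2 := PySem.List.pySetD c1 (col_no_input + 2) (PySem.Int.toStr TSS)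
      (c2, TSS - pvInt (pvGet c2 1), TES - pvInt (pvGet c2 1))
  let cur := r.1
  let Dis2TSS := r.2.1
  let Dis2TES := r.2.2
  let Pos :=
    if |Dis2TSS| ≤ 250 then "ProximalPromoter"
    else if |Dis2TSS| ≤ 1000 then "Promoter1k"
    else if |Dis2TSS| ≤ 3000 then "Promoter3k"
    else "genebody"
  let cur_output :=
    if anno_db == "ensembl" then
      [pvGet cur (col_no_input+3), pvGet cur (col_no_input+5), pvGet cur (col_no_input+6),
       pvGet cur (col_no_input+10), pvGet cur (col_no_input+11), Pos, PySem.Int.toStr Dis2TSS,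
       pvGet cur (col_no_input+9)]
    else
      [pvGet cur (col_no_input+4), pvGet cur (col_no_input+5), pvGet cur (col_no_input+6),
       pvGet cur (col_no_input+10), pvGet cur (col_no_input+11), Pos, PySem.Int.toStr Dis2TSS,
       pvGet cur (col_no_input+9)]
  (cur_output, Dis2TSS, Dis2TES)

-- one iteration of A's loop over GB_entry (state: best-so-far option, formatted list)
def pvStepA (anno_db : String) (col_no_input : Int)
    (st : Option (List String) × List (List String)) (i : List String) :
    Option (List String) × List (List String) :=
  if !((pvGet i col_no_input == ".") && (pvGet i (col_no_input + 1) == "-1")) then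
    let r := getDis2TSS anno_db i col_no_input
    let cur_output := r.1
    let Dis2TSS := r.2.1
    let best :=
      match st.1 with
      | none => some cur_output
      | some b => if |pvInt (pvGet b 6)| > |Dis2TSS| then some cur_output else some b
    (best, st.2 ++ [cur_output])
  else st

def getBestHit (anno_db : String) (col_no_input : Int) (GB_entry : List (List String)) (gd_entry : String) (st_entry : String) (pc_entry : String) : List (List String) × List String :=
  let st := GB_entry.foldl (pvStepA anno_db col_no_input) (none, [])
  let best := st.1
  let formatted := st.2
  let (best, formatted) :=
    if gd_entry ≠ "0" then
      let cur : List String := ["NA", "NA", ".", "NA", "NA", "Genedesert", "NA", "No_anno"]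
      ((match best with | none => some cur | some b => some b), formatted ++ [cur])
    else (best, formatted)
  let (best, formatted) :=
    if st_entry ≠ "0" then
      let cur : List String := ["NA", "NA", ".", "NA", "NA", "Subtelomere", "NA", "No_anno"]
      ((match best with | none => some cur | some b => some b), formatted ++ [cur])
    else (best, formatted)
  let (best, formatted) :=
    if pc_entry ≠ "0" then
      let cur : List String := ["NA", "NA", ".", "NA", "NA", "Pericentromere", "NA", "No_anno"]
      ((match best with | none => some cur | some b => some b), formatted ++ [cur])
    else (best, formatted)
  match best with
  | none =>
    let cur : List String := ["NA", "NA", ".", "NA", "NA", "Otherintergenic", "NA", "No_anno"]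
    (formatted ++ [cur], cur)
  | some b => (formatted, b)

-- ===== PORT B =====
-- a genebody hit as a keyed candidate (output, rank 0, |Dis2TSS|)
def pvKeyed (anno_db : String) (col_no_input : Int) (row : List String) :
    List String × Int × Int :=
  let r := getDis2TSS anno_db row col_no_input
  (r.1, 0, |r.2.1|)

-- the keyed pool of non-null genebody hits
def pvGB (anno_db : String) (col_no_input : Int) (l : List (List String)) :
    List (List String × Int × Int) :=
  (l.filter
      (fun row => (pvGet row col_no_input != ".") || (pvGet row (col_no_input + 1) != "-1"))).map
      (pvKeyed anno_db col_no_input)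

-- the NA candidates, rank 1, from the flag table
def pvNA (gd_entry st_entry pc_entry : String) : List (List String × Int × Int) :=
  (([(gd_entry, "Genedesert"), (st_entry, "Subtelomere"),
     (pc_entry, "Pericentromere")] : List (String × String)).filter
      (fun fp => fp.1 ≠ "0")).map
      (fun fp => ((["NA", "NA", ".", "NA", "NA", fp.2, "NA", "No_anno"] : List String),
                  (1 : Int), (0 : Int)))

def getBestHit_alt (anno_db : String) (col_no_input : Int) (GB_entry : List (List String)) (gd_entry : String) (st_entry : String) (pc_entry : String) : List (List String) × List String :=
  let entries := pvGB anno_db col_no_input GB_entry ++ pvNA gd_entry st_entry pc_entry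
  if entries.isEmpty then
    let fallback : List String := ["NA", "NA", ".", "NA", "NA", "Otherintergenic", "NA", "No_anno"]
    ([fallback], fallback)
  else
    let best := PySem.List.min2? entries (fun e => e.2.1) (fun e => e.2.2)
    (entries.map (fun e => e.1), (best.getD ([], 0, 0)).1)

-- ===== PRECONDITION & SPEC =====
-- xs[i] in-range (Python negative indices allowed) and resolved position of an index
def pvInR (n : Nat) (i : Int) : Bool := decide (-(n : Int) ≤ i ∧ i < (n : Int))
def pvRes (n : Nat) (i : Int) : Int := if i < 0 then (n : Int) + i else i

-- exactly the inputs on which Python A returns: every row readable at col / col+1, and on every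
-- non-null row all accessed cells in range, both coordinate cells parse as int, and the row's
-- position cell (index 1, read AFTER the in-place writes) parses unless one of the writes lands on it
def Pre_getBestHit (anno_db : String) (col_no_input : Int) (GB_entry : List (List String)) (gd_entry : String) (st_entry : String) (pc_entry : String) : Prop :=
  ∀ row ∈ GB_entry,
    pvInR row.length col_no_input = true ∧ pvInR row.length (col_no_input + 1) = true ∧
    (¬ (pvGet row col_no_input = "." ∧ pvGet row (col_no_input + 1) = "-1") →
      2 ≤ row.length ∧
      (∀ k ∈ ([2, 3, 4, 5, 6, 9, 10, 11] : List Int), pvInR row.length (col_no_input + k) = true) ∧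
      (PySem.Int.ofStr? (pvGet row (col_no_input + 10))).isSome = true ∧
      (PySem.Int.ofStr? (pvGet row (col_no_input + 11))).isSome = true ∧
      (pvRes row.length (col_no_input + 1) = 1 ∨ pvRes row.length (col_no_input + 2) = 1 ∨
        (PySem.Int.ofStr? (pvGet row 1)).isSome = true))
instance (anno_db : String) (col_no_input : Int) (GB_entry : List (List String)) (gd_entry : String) (st_entry : String) (pc_entry : String) : Decidable (Pre_getBestHit anno_db col_no_input GB_entry gd_entry st_entry pc_entry) := by unfold Pre_getBestHit; infer_instance

def pvWitness_getBestHit : String × Int × List (List String) × String × String × String :=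
  ("ensembl", 0, [[".", "-1"],
                  ["chr1", "100", "x", "g1", "G1", "+", "b", "c", "d", "pid", "90", "200"]],
   "0", "0", "1")

def Spec_getBestHit (anno_db : String) (col_no_input : Int) (GB_entry : List (List String)) (gd_entry : String) (st_entry : String) (pc_entry : String) (out : List (List String) × List String) : Prop := out = getBestHit_alt anno_db col_no_input GB_entry gd_entry st_entry pc_entry
instance (anno_db : String) (col_no_input : Int) (GB_entry : List (List String)) (gd_entry : String) (st_entry : String) (pc_entry : String) (out : List (List String) × List String) : Decidable (Spec_getBestHit anno_db col_no_input GB_entry gd_entry st_entry pc_entry out) := by unfold Spec_getBestHit; infer_instance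

-- ===== CLAIM (what is proved, stated in full; the proofs are below) =====
def Claim_equal_getBestHit : Prop := ∀ (anno_db : String) (col_no_input : Int) (GB_entry : List (List String)) (gd_entry : String) (st_entry : String) (pc_entry : String), Dom_getBestHit anno_db col_no_input GB_entry gd_entry st_entry pc_entry → Pre_getBestHit anno_db col_no_input GB_entry gd_entry st_entry pc_entry → Spec_getBestHit anno_db col_no_input GB_entry gd_entry st_entry pc_entry (getBestHit anno_db col_no_input GB_entry gd_entry st_entry pc_entry)

-- ===== LEMMAS AND PROOFS =====

-- the folding step of B's lexicographic min (min2? with keys .2.1, .2.2)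
def pvStep2 (acc : Option (List String × Int × Int)) (x : List String × Int × Int) :
    Option (List String × Int × Int) :=
  match acc with
  | none => some x
  | some m =>
    if (decide (x.2.1 < m.2.1) || !decide (m.2.1 < x.2.1) && decide (x.2.2 < m.2.2)) = true
    then some x else some m

theorem min2?_eq_foldl (xs : List (List String × Int × Int)) :
    PySem.List.min2? xs (fun e => e.2.1) (fun e => e.2.2) = xs.foldl pvStep2 none := by
  unfold PySem.List.min2?
  congr 1
  funext acc x
  cases acc <;> simp [pvStep2]

-- Python int(str(d)) == d: the PySem parser/printer roundtrip, needed because A re-reads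
-- the best hit's distance from its formatted string while B keys on the integer itself

theorem isIntSpace_false_of_isDigit {c : Char} (h : c.isDigit = true) :
    PySem.Int.isIntSpace c = false := by
  simp only [PySem.Int.isIntSpace, Bool.or_eq_false_iff, decide_eq_false_iff_not]
  refine ⟨⟨⟨⟨⟨?_, ?_⟩, ?_⟩, ?_⟩, ?_⟩, ?_⟩ <;> rintro rfl <;> simp [Char.isDigit] at h

theorem dropWhile_eq_self_of_all {p : Char → Bool} {l : List Char}
    (h : ∀ c ∈ l, p c = false) : List.dropWhile p l = l := by
  cases l with
  | nil => rfl
  | cons c t => simp [h c (by simp)]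

theorem strip_eq_self {l : List Char} (h : ∀ c ∈ l, PySem.Int.isIntSpace c = false) :
    (List.dropWhile PySem.Int.isIntSpace
      (List.dropWhile PySem.Int.isIntSpace l).reverse).reverse = l := by
  rw [dropWhile_eq_self_of_all h, dropWhile_eq_self_of_all (by simpa using h), List.reverse_reverse]

theorem digitChar_toNat {r : Nat} (h : r < 10) : r.digitChar.toNat - 48 = r := by
  interval_cases r <;> decide

theorem foldl_toDigits (m : Nat) : ∀ acc : Nat,
    (Nat.toDigits 10 m).foldl (fun a c => a * 10 + (c.toNat - 48)) acc
      = acc * 10 ^ (Nat.toDigits 10 m).length + m := by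
  induction m using Nat.strong_induction_on with
  | _ m ih =>
    intro acc
    by_cases hm : m < 10
    · rw [Nat.toDigits_of_lt_base hm]
      simp [digitChar_toNat hm]
    · rw [Nat.toDigits_of_base_le (by omega) (by omega), List.foldl_append]
      rw [ih (m / 10) (by omega) acc]
      simp only [List.foldl_cons, List.foldl_nil, List.length_append, List.length_cons,
        List.length_nil]
      rw [digitChar_toNat (by omega)]
      ring_nf
      omega

theorem toDigits_all_digit (m : Nat) : ∀ c ∈ Nat.toDigits 10 m, c.isDigit = true :=
  fun c hc => Nat.isDigit_of_mem_toDigits (by norm_num) (by norm_num) hc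

theorem plusParse (ds : List Char) (hne : ds ≠ []) (hall : ∀ c ∈ ds, c.isDigit = true) :
    PySem.Int.ofChars? ('+' :: ds) =
      some ((ds.foldl (fun a c => a * 10 + (c.toNat - 48)) 0 : Nat) : Int) := by
  have hsp : ∀ c ∈ ('+' :: ds : List Char), PySem.Int.isIntSpace c = false := by
    intro x hx
    rcases List.mem_cons.mp hx with rfl | hx
    · decide
    · exact isIntSpace_false_of_isDigit (hall x hx)
  unfold PySem.Int.ofChars?
  rw [strip_eq_self hsp]
  simp only []
  rcases ds with _ | ⟨c, t⟩
  · exact absurd rfl hne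
  have key : ∀ (o : Option Nat) (m : Nat), o = some m →
      (Option.map (fun x : Int => x) (do let a ← o; pure ((a : Int)))) = some ((m : Nat) : Int) := by
    rintro o m rfl; simp
  apply key _ ((c :: t).foldl (fun a ch => a * 10 + (ch.toNat - 48)) 0)
  conv_lhs => whnf
  have hcd := hall c (by simp)
  cases hcb : c.isDigit
  · rw [hcb] at hcd; exact absurd hcd (by simp)
  · conv_lhs => whnf
    have h0 : '0'.toNat = 48 := rfl
    rw [h0]
    simp only [List.foldl_cons]
    have hallt : ∀ x ∈ t, x.isDigit = true := fun x hx => hall x (List.mem_cons_of_mem _ hx)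
    clear hall hsp hne hcd hcb key
    generalize 0 * 10 + (c.toNat - 48) = acc
    clear c
    revert hallt
    induction t generalizing acc with
    | nil =>
      intro _
      conv_lhs => whnf
      simp
    | cons d t' ih =>
      intro hallt
      conv_lhs => whnf
      have hdd := hallt d (by simp)
      cases hdb : d.isDigit
      · rw [hdb] at hdd; exact absurd hdd (by simp)
      · conv_lhs => whnf
        rw [h0]
        simp only [List.foldl_cons]
        generalize acc * 10 + (d.toNat - 48) = acc2
        exact ih acc2 (fun x hx => hallt x (List.mem_cons_of_mem _ hx))

theorem minusParse (ds : List Char) (hne : ds ≠ []) (hall : ∀ c ∈ ds, c.isDigit = true) :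
    PySem.Int.ofChars? ('-' :: ds) =
      some (-((ds.foldl (fun a c => a * 10 + (c.toNat - 48)) 0 : Nat) : Int)) := by
  have hp := plusParse ds hne hall
  have hspP : ∀ c ∈ ('+' :: ds : List Char), PySem.Int.isIntSpace c = false := by
    intro x hx
    rcases List.mem_cons.mp hx with rfl | hx
    · decide
    · exact isIntSpace_false_of_isDigit (hall x hx)
  have hspM : ∀ c ∈ ('-' :: ds : List Char), PySem.Int.isIntSpace c = false := by
    intro x hx
    rcases List.mem_cons.mp hx with rfl | hx
    · decide
    · exact isIntSpace_false_of_isDigit (hall x hx)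
  unfold PySem.Int.ofChars? at hp ⊢
  rw [strip_eq_self hspP] at hp
  rw [strip_eq_self hspM]
  simp only [] at hp ⊢
  have tr : ∀ (o : Option Nat) (v : Int),
      (Option.map (fun x : Int => x) (do let a ← o; pure ((a : Int)))) = some v →
      (Option.map (fun x : Int => -x) (do let a ← o; pure ((a : Int)))) = some (-v) := by
    intro o v h
    cases o <;> simp_all
  exact tr _ _ hp

theorem bareParse (ds : List Char) (hne : ds ≠ []) (hall : ∀ c ∈ ds, c.isDigit = true) :
    PySem.Int.ofChars? ds =
      some ((ds.foldl (fun a c => a * 10 + (c.toNat - 48)) 0 : Nat) : Int) := by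
  have hp := plusParse ds hne hall
  have hspP : ∀ c ∈ ('+' :: ds : List Char), PySem.Int.isIntSpace c = false := by
    intro x hx
    rcases List.mem_cons.mp hx with rfl | hx
    · decide
    · exact isIntSpace_false_of_isDigit (hall x hx)
  have hsp : ∀ c ∈ ds, PySem.Int.isIntSpace c = false :=
    fun x hx => isIntSpace_false_of_isDigit (hall x hx)
  unfold PySem.Int.ofChars? at hp ⊢
  rw [strip_eq_self hspP] at hp
  rw [strip_eq_self hsp]
  simp only [] at hp ⊢
  rcases ds with _ | ⟨c, t⟩
  · exact absurd rfl hne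
  have hcd := hall c (by simp)
  split
  · next ds' heq =>
    exfalso
    have : c = '-' := (List.cons.injEq _ _ _ _ ▸ heq).1
    rw [this] at hcd; simp [Char.isDigit] at hcd
  · next ds' heq =>
    exfalso
    have : c = '+' := (List.cons.injEq _ _ _ _ ▸ heq).1
    rw [this] at hcd; simp [Char.isDigit] at hcd
  · exact hp

theorem ofChars?_toChars (n : Int) : PySem.Int.ofChars? (PySem.Int.toChars n) = some n := by
  by_cases hn : n < 0
  · have htc : PySem.Int.toChars n = '-' :: Nat.toDigits 10 n.natAbs := by
      unfold PySem.Int.toChars; rw [if_pos hn]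
    have hne : Nat.toDigits 10 n.natAbs ≠ [] := by
      have := Nat.length_toDigits_pos (b := 10) (n := n.natAbs)
      intro h; rw [h] at this; simp at this
    rw [htc, minusParse _ hne (toDigits_all_digit _), foldl_toDigits]
    simp only [Nat.zero_mul, Nat.zero_add]
    congr 1
    omega
  · have htc : PySem.Int.toChars n = Nat.toDigits 10 n.toNat := by
      unfold PySem.Int.toChars; rw [if_neg hn]
    have hne : Nat.toDigits 10 n.toNat ≠ [] := by
      have := Nat.length_toDigits_pos (b := 10) (n := n.toNat)
      intro h; rw [h] at this; simp at this
    rw [htc, bareParse _ hne (toDigits_all_digit _), foldl_toDigits]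
    simp only [Nat.zero_mul, Nat.zero_add]
    congr 1
    omega

theorem ofStr?_toStr_roundtrip (n : Int) : PySem.Int.ofStr? (PySem.Int.toStr n) = some n := by
  have h1 : PySem.Int.toStr n = String.ofList (PySem.Int.toChars n) := rfl
  rw [h1, PySem.Int.ofStr?_ofList, ofChars?_toChars]

-- a keyed candidate is consistent: rank 0 and its stored Dis2TSS string names its key
def pvGoodT (x : List String × Int × Int) : Prop :=
  x.2.1 = 0 ∧ |pvInt (pvGet x.1 6)| = x.2.2

theorem pvInt_toStr (d : Int) : pvInt (PySem.Int.toStr d) = d := by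
  simp [pvInt, ofStr?_toStr_roundtrip]

theorem pvKeyed_good (anno_db : String) (col : Int) (row : List String) :
    pvGoodT (pvKeyed anno_db col row) := by
  unfold pvKeyed pvGoodT getDis2TSS
  refine ⟨rfl, ?_⟩
  by_cases h5 : pvGet row (col + 5) ≠ "-" <;>
    by_cases hdb : anno_db == "ensembl" <;>
    simp [hdb, pvGet, PySem.List.pyGetD, pvInt_toStr]

-- A's loop ≡ fold of pvStep2 over the keyed genebody pool, building formatted by append
theorem stepA_foldl (anno_db : String) (col : Int) (l : List (List String))
    (m0 : Option (List String × Int × Int)) (h0 : ∀ m, m0 = some m → pvGoodT m)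
    (f0 : List (List String)) :
    l.foldl (pvStepA anno_db col) (m0.map (fun e => e.1), f0) =
      (((pvGB anno_db col l).foldl pvStep2 m0).map (fun e => e.1),
        f0 ++ (pvGB anno_db col l).map (fun e => e.1)) := by
  induction l generalizing m0 f0 with
  | nil => simp [pvGB]
  | cons row t ih =>
    by_cases h : ((pvGet row col != ".") || (pvGet row (col + 1) != "-1")) = true
    · have hA : (!((pvGet row col == ".") && (pvGet row (col + 1) == "-1"))) = true := by
        simpa [Bool.not_and] using h
      have hxg := pvKeyed_good anno_db col row
      have hdis : |(getDis2TSS anno_db row col).2.1| = (pvKeyed anno_db col row).2.2 := rfl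
      cases m0 with
      | none =>
        simp only [Option.map_none, List.foldl_cons, pvStepA, hA, if_pos, pvGB,
          List.filter_cons, h, List.map_cons, List.foldl_cons]
        have := ih (m0 := some (pvKeyed anno_db col row))
          (h0 := by intro m hm; cases hm; exact hxg) (f0 := f0 ++ [(pvKeyed anno_db col row).1])
        simp only [Option.map_some] at this
        rw [show (getDis2TSS anno_db row col).1 = (pvKeyed anno_db col row).1 from rfl, this]
        simp [pvStep2, pvGB]
      | some m =>
        have hm := h0 m rfl
        simp only [Option.map_some, List.foldl_cons, pvStepA, hA, if_pos, pvGB,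
          List.filter_cons, h, List.map_cons, List.foldl_cons]
        have hcond : (|pvInt (pvGet m.1 6)| > |(getDis2TSS anno_db row col).2.1|) ↔
            ((decide ((pvKeyed anno_db col row).2.1 < m.2.1) ||
              !decide (m.2.1 < (pvKeyed anno_db col row).2.1) &&
              decide ((pvKeyed anno_db col row).2.2 < m.2.2)) = true) := by
          have hx0 : (pvKeyed anno_db col row).2.1 = 0 := hxg.1
          rw [hx0, hm.1, ← hdis, ← hm.2]
          constructor
          · intro hlt
            simp
            omega
          · intro hb
            simp at hb
            omega
        by_cases hc : |pvInt (pvGet m.1 6)| > |(getDis2TSS anno_db row col).2.1|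
        · have hb := hcond.mp hc
          have := ih (m0 := some (pvKeyed anno_db col row))
            (h0 := by intro m' hm'; cases hm'; exact hxg)
            (f0 := f0 ++ [(pvKeyed anno_db col row).1])
          simp only [Option.map_some] at this
          rw [if_pos hc,
            show (getDis2TSS anno_db row col).1 = (pvKeyed anno_db col row).1 from rfl, this]
          simp [pvStep2, hb, pvGB]
        · have hb : ¬ ((decide ((pvKeyed anno_db col row).2.1 < m.2.1) ||
              !decide (m.2.1 < (pvKeyed anno_db col row).2.1) &&
              decide ((pvKeyed anno_db col row).2.2 < m.2.2)) = true) := fun hh => hc (hcond.mpr hh)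
          have := ih (m0 := some m) (h0 := by intro m' hm'; cases hm'; exact hm)
            (f0 := f0 ++ [(pvKeyed anno_db col row).1])
          simp only [Option.map_some] at this
          rw [if_neg hc,
            show (getDis2TSS anno_db row col).1 = (pvKeyed anno_db col row).1 from rfl, this]
          simp only [pvStep2, if_neg hb]
          simp [pvGB]
    · have hA : (!((pvGet row col == ".") && (pvGet row (col + 1) == "-1"))) = false := by
        simpa [Bool.not_and] using h
      simp only [List.foldl_cons, pvStepA, hA, Bool.false_eq_true, if_false, pvGB,
        List.filter_cons, h]
      simpa [pvGB] using ih (m0 := m0) (h0 := h0) (f0 := f0)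

-- folding pvStep2 from a some-state stays some and preserves consistency over the genebody pool
theorem foldl2_good (l : List (List String × Int × Int)) (hl : ∀ x ∈ l, pvGoodT x)
    (m : List String × Int × Int) (hm : pvGoodT m) :
    ∃ M, l.foldl pvStep2 (some m) = some M ∧ pvGoodT M := by
  induction l generalizing m with
  | nil => exact ⟨m, rfl, hm⟩
  | cons x t ih =>
    have hx := hl x (by simp)
    have ht : ∀ y ∈ t, pvGoodT y := fun y hy => hl y (by simp [hy])
    simp only [List.foldl_cons, pvStep2]
    split_ifs with hcond
    · exact ih ht x hx
    · exact ih ht m hm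

-- rank-1 candidates never displace a rank-0 best
theorem foldl2_keep_na (na : List (List String × Int × Int))
    (hna : ∀ x ∈ na, x.2.1 = 1) (M : List String × Int × Int) (hM : M.2.1 = 0) :
    na.foldl pvStep2 (some M) = some M := by
  induction na with
  | nil => rfl
  | cons x t ih =>
    have hx := hna x (by simp)
    have hcond : (decide (x.2.1 < M.2.1) || !decide (M.2.1 < x.2.1) && decide (x.2.2 < M.2.2))
        = false := by simp [hx, hM]
    simp only [List.foldl_cons, pvStep2, hcond]
    exact ih (fun y hy => hna y (by simp [hy]))


theorem getBestHit_spec : Claim_equal_getBestHit := by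
  unfold Claim_equal_getBestHit
  intro anno_db col gbe gd st pc _hDom _hPre
  unfold Spec_getBestHit getBestHit getBestHit_alt
  have hfold := stepA_foldl anno_db col gbe none (by intro m hm; cases hm) []
  simp only [Option.map_none, List.nil_append] at hfold
  rw [hfold]
  simp only [min2?_eq_foldl]
  have hgood : ∀ z ∈ pvGB anno_db col gbe, pvGoodT z := by
    intro z hz
    simp only [pvGB, List.mem_map] at hz
    obtain ⟨row, _, rfl⟩ := hz
    exact pvKeyed_good anno_db col row
  have hna1 : ∀ y ∈ pvNA gd st pc, y.2.1 = 1 := by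
    intro y hy
    simp only [pvNA, List.mem_map] at hy
    obtain ⟨fp, _, rfl⟩ := hy
    rfl
  cases hgb : pvGB anno_db col gbe with
  | nil =>
    simp only [List.foldl_nil, Option.map_none, List.map_nil, List.nil_append]
    by_cases hgd : gd ≠ "0" <;> by_cases hst : st ≠ "0" <;> by_cases hpc : pc ≠ "0" <;>
      simp [pvNA, hgd, hst, hpc, pvStep2]
  | cons x t =>
    have hxg : pvGoodT x := hgood x (by rw [hgb]; simp)
    have htg : ∀ z ∈ t, pvGoodT z := fun z hz => hgood z (by rw [hgb]; simp [hz])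
    obtain ⟨M, hM, hMg⟩ := foldl2_good t htg x hxg
    have hB : ((x :: t) ++ pvNA gd st pc).foldl pvStep2 none = some M := by
      rw [List.foldl_append]
      simp only [List.foldl_cons]
      rw [show pvStep2 none x = some x from rfl, hM]
      exact foldl2_keep_na _ hna1 M hMg.1
    simp only [hB]
    simp only [List.foldl_cons, show pvStep2 none x = some x from rfl, hM, Option.map_some]
    by_cases hgd : gd ≠ "0" <;> by_cases hst : st ≠ "0" <;> by_cases hpc : pc ≠ "0" <;>
      simp [pvNA, hgd, hst, hpc, List.append_assoc]
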